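-- pv_equiv track=rewrite | github.com/allenai/allennlp | allennlp/semparse/contexts/quarel_utils.py | to_qr_spec_string
-- ===== SOURCE A (Python) =====
-- from typing import Any, Dict, List, Set, Tuple, Union
--
-- def to_qr_spec_string(qr_coeff_sets: List[Dict[str, int]]) -> str:
--     res = []
--     signs = {1:"+", -1:"-"}
--     for qr_set in qr_coeff_sets:
--         first = True
--         group_list = []
--         for attr, sign in qr_set.items():
--             signed_attr = signs[sign] + attr
--             if first:
--                 first = False
--                 if sign == 1:
--                     signed_attr = attr
--             group_list.append(signed_attr)
--         res.append(f'[{", ".join(group_list)}]')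
--     return "\n".join(res)
-- ===== SOURCE B (Python) =====
-- from typing import Dict, List
--
-- def to_qr_spec_string(qr_coeff_sets: List[Dict[str, int]]) -> str:
--     # Back-to-front construction: walk the groups (and each group's tail) in
--     # reverse, prefixing each tail element with its ', ' separator and sign
--     # character, and prepending a case-matched head; no join, no first-flag.
--     def sign_char(sign):
--         if sign == 1:
--             return "+"
--         if sign == -1:
--             return "-"
--         raise KeyError(sign)
--
--     out = None
--     for qr_set in reversed(qr_coeff_sets):
--         items = list(qr_set.items())
--         body = ""
--         for attr, sign in reversed(items[1:]):
--             body = ", " + sign_char(sign) + attr + body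
--         if items:
--             attr, sign = items[0]
--             body = (attr if sign == 1 else sign_char(sign) + attr) + body
--         out = "[" + body + "]" + ("" if out is None else "\n" + out)
--     return out if out is not None else ""
-- ===== Notes on version B (the rewrite author's own statement) =====
-- stated objective: alternative
-- what changed: B builds the result back-to-front: it traverses the groups and each group's tail in reverse, prefixing every tail element with its ', ' separator and sign and prepending a case-matched head, instead of A's forward accumulate-into-a-list-then-join loops with a first-element boolean flag and a sign dictionary.
import Mathlib
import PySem

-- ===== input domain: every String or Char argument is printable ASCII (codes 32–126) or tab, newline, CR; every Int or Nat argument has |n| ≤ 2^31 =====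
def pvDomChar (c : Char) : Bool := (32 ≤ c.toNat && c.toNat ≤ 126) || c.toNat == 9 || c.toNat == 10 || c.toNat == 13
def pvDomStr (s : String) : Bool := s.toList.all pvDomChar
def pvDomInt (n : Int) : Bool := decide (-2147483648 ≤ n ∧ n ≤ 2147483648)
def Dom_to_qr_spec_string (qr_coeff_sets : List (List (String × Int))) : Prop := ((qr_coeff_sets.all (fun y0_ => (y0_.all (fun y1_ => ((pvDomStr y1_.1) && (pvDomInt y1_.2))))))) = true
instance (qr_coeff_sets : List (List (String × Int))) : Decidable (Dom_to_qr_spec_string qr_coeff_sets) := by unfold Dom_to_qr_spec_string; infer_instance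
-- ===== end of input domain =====

-- B builds the result back-to-front (reverse traversal, separator prefixed to each
-- tail element, case-matched head) instead of A's forward accumulate-then-join loops
-- with a first-element flag and a sign dictionary (objective: alternative).


-- ===== PORT A =====
-- signs = {1: "+", -1: "-"} (as List Char values; string work is done on List Char via PySem.Chars, exact)
def pvSigns : PySem.Dict Int (List Char) := ⟨[(1, ['+']), (-1, ['-'])]⟩

-- inner loop of A: the `first` flag and the group_list accumulator, step for step
def pvGroupA (qr_set : List (String × Int)) : List (List Char) :=
  (qr_set.foldl
    (fun (st : Bool × List (List Char)) p =>
      let signed_attr := pvSigns.getD p.2 [] ++ p.1.toList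
      if st.1 then
        (false, st.2 ++ [if p.2 = 1 then p.1.toList else signed_attr])
      else
        (st.1, st.2 ++ [signed_attr]))
    (true, [])).2

def to_qr_spec_string (qr_coeff_sets : List (List (String × Int))) : String :=
  let res := qr_coeff_sets.foldl
    (fun (res : List (List Char)) qr_set =>
      res ++ [['['] ++ PySem.Chars.join [',', ' '] (pvGroupA qr_set) ++ [']']]) []
  String.ofList (PySem.Chars.join ['\n'] res)

-- ===== PORT B =====
-- sign_char: '+' / '-' ; any other sign raises KeyError in Python — those inputs are
-- excluded by Pre_, so the port returns [] there (a value never used inside Pre_)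
def pvSignChar (sign : Int) : List Char :=
  if sign = 1 then ['+'] else if sign = -1 then ['-'] else []

-- B's inner reversed loop: body built back-to-front, each tail element prefixed by ', ' and its sign
def pvGroupB (items : List (String × Int)) : List Char :=
  let body := ((items.drop 1).reverse).foldl
    (fun (body : List Char) p =>
      [',', ' '] ++ pvSignChar p.2 ++ p.1.toList ++ body) []
  match items with
  | [] => body
  | p :: _ => (if p.2 = 1 then p.1.toList else pvSignChar p.2 ++ p.1.toList) ++ body

-- B's outer reversed loop over the groups, out : Option (None until the first piece)
def to_qr_spec_string_alt (qr_coeff_sets : List (List (String × Int))) : String :=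
  let out := qr_coeff_sets.reverse.foldl
    (fun (out : Option (List Char)) qr_set =>
      some (['['] ++ pvGroupB qr_set ++ [']'] ++
        (match out with | none => [] | some o => '\n' :: o))) none
  String.ofList (out.getD [])

-- ===== PRECONDITION & SPEC =====
-- Pre_ excludes any sign other than 1 or -1: there Python A raises KeyError on signs[sign]
-- (it returns on every other input).
def Pre_to_qr_spec_string (qr_coeff_sets : List (List (String × Int))) : Prop :=
  (qr_coeff_sets.all (fun qr_set => qr_set.all (fun p => p.2 = 1 || p.2 = -1))) = true
instance (qr_coeff_sets : List (List (String × Int))) : Decidable (Pre_to_qr_spec_string qr_coeff_sets) := by unfold Pre_to_qr_spec_string; infer_instance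

def pvWitness_to_qr_spec_string : (List (List (String × Int))) :=
  [[("size", 1), ("weight", -1)], [("speed", -1)]]

def Spec_to_qr_spec_string (qr_coeff_sets : List (List (String × Int))) (out : String) : Prop := out = to_qr_spec_string_alt qr_coeff_sets
instance (qr_coeff_sets : List (List (String × Int))) (out : String) : Decidable (Spec_to_qr_spec_string qr_coeff_sets out) := by unfold Spec_to_qr_spec_string; infer_instance

-- ===== CLAIM (what is proved, stated in full; the proofs are below) =====
def Claim_equal_to_qr_spec_string : Prop := ∀ (qr_coeff_sets : List (List (String × Int))), Dom_to_qr_spec_string qr_coeff_sets → Pre_to_qr_spec_string qr_coeff_sets → Spec_to_qr_spec_string qr_coeff_sets (to_qr_spec_string qr_coeff_sets)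

-- ===== LEMMAS AND PROOFS =====

-- once `first` is false, A's inner loop is a plain map
lemma pvGroupA_after_first (qr_set : List (String × Int)) (acc : List (List Char)) :
    (qr_set.foldl
      (fun (st : Bool × List (List Char)) p =>
        let signed_attr := pvSigns.getD p.2 [] ++ p.1.toList
        if st.1 then
          (false, st.2 ++ [if p.2 = 1 then p.1.toList else signed_attr])
        else
          (st.1, st.2 ++ [signed_attr]))
      (false, acc)) =
    (false, acc ++ qr_set.map (fun p => pvSigns.getD p.2 [] ++ p.1.toList)) := by
  induction qr_set generalizing acc with
  | nil => simp
  | cons p rest ih => simp [List.foldl_cons, ih]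

-- A's group list: special-cased head, then the uniform map
lemma pvGroupA_cons (p : String × Int) (rest : List (String × Int)) :
    pvGroupA (p :: rest) =
      (if p.2 = 1 then p.1.toList else pvSigns.getD p.2 [] ++ p.1.toList)
        :: rest.map (fun q => pvSigns.getD q.2 [] ++ q.1.toList) := by
  unfold pvGroupA
  simp [List.foldl_cons, pvGroupA_after_first]

-- A's ', '-join of the tail map equals B's back-to-front tail body (appended to the head x)
lemma tail_eq (rest : List (String × Int)) (x : List Char)
    (h : (rest.all (fun p => p.2 = 1 || p.2 = -1)) = true) :
    PySem.Chars.join [',', ' '] (x :: rest.map (fun q => pvSigns.getD q.2 [] ++ q.1.toList)) =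
      x ++ rest.foldr
        (fun p body => [',', ' '] ++ pvSignChar p.2 ++ p.1.toList ++ body)
        [] := by
  induction rest generalizing x with
  | nil => simp [PySem.Chars.join_singleton]
  | cons q t ih =>
    rw [List.all_cons, Bool.and_eq_true] at h
    have hq : q.2 = 1 ∨ q.2 = -1 := by have := h.1; simpa using this
    rw [List.map_cons, PySem.Chars.join_cons_cons, List.foldr_cons,
        ih (pvSigns.getD q.2 [] ++ q.1.toList) h.2]
    rcases hq with h1 | hm1
    · simp [h1, pvSignChar, pvSigns, PySem.Dict.getD, PySem.Dict.get?]
    · simp [hm1, pvSignChar, pvSigns, PySem.Dict.getD, PySem.Dict.get?]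

-- the per-group equivalence
lemma group_eq (qr_set : List (String × Int))
    (h : (qr_set.all (fun p => p.2 = 1 || p.2 = -1)) = true) :
    PySem.Chars.join [',', ' '] (pvGroupA qr_set) = pvGroupB qr_set := by
  cases qr_set with
  | nil => simp [pvGroupA, pvGroupB, PySem.Chars.join_nil]
  | cons p rest =>
    rw [List.all_cons, Bool.and_eq_true] at h
    have hp : p.2 = 1 ∨ p.2 = -1 := by have := h.1; simpa using this
    rw [pvGroupA_cons, tail_eq rest _ h.2]
    unfold pvGroupB
    rw [List.foldl_reverse]
    rcases hp with h1 | hm1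
    · simp [h1]
    · simp [hm1, pvSignChar, pvSigns, PySem.Dict.getD, PySem.Dict.get?]

-- B's outer reversed loop, on a nonempty list, is `some` of the '\n'-join of the pieces
lemma outer_eq (a : List (String × Int)) (t : List (List (String × Int))) :
    (a :: t).reverse.foldl
      (fun (out : Option (List Char)) qr_set =>
        some (['['] ++ pvGroupB qr_set ++ [']'] ++
          (match out with | none => [] | some o => '\n' :: o))) none =
    some (PySem.Chars.join ['\n']
      ((a :: t).map (fun qr => ['['] ++ pvGroupB qr ++ [']']))) := by
  induction t generalizing a with
  | nil => simp [PySem.Chars.join_singleton]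
  | cons b t' ih =>
    rw [List.reverse_cons, List.foldl_append, ih b]
    simp only [List.foldl_cons, List.foldl_nil, List.map_cons, PySem.Chars.join_cons_cons]
    simp

-- ===== VERDICT (by name: the statement is the Claim_ definition above) =====
theorem to_qr_spec_string_spec : Claim_equal_to_qr_spec_string := by
  intro qr_coeff_sets _hdom hpre
  unfold Spec_to_qr_spec_string to_qr_spec_string to_qr_spec_string_alt
  have hres : qr_coeff_sets.foldl
      (fun (res : List (List Char)) qr_set =>
        res ++ [['['] ++ PySem.Chars.join [',', ' '] (pvGroupA qr_set) ++ [']']]) []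
      = qr_coeff_sets.map (fun qr => ['['] ++ pvGroupB qr ++ [']']) := by
    rw [PySem.List.foldl_append_singleton_eq_map
      (fun qr_set => ['['] ++ PySem.Chars.join [',', ' '] (pvGroupA qr_set) ++ [']'])]
    simp only [List.nil_append]
    apply List.map_congr_left
    intro qr_set hmem
    rw [group_eq]
    unfold Pre_to_qr_spec_string at hpre
    rw [List.all_eq_true] at hpre
    exact hpre qr_set hmem
  rw [hres]
  cases qr_coeff_sets with
  | nil => simp [PySem.Chars.join_nil]
  | cons a t => rw [outer_eq]; simp
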